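-- pv_equiv track=rewrite | github.com/Shadowz-git/fondamenti1 | eseDomjudge/r4.py | ricorsiva
-- ===== SOURCE A (Python) =====
-- def ricorsiva(L, x):
--     count = 0
--     for i in range(len(L)):
--         if L[i] == x:
--             L[i] = 0
--             count += 1
--     if count == 0:
--         return 0
--     return count + ricorsiva(L, count)
-- ===== SOURCE B (Python) =====
-- def ricorsiva(L, x):
--     # Frequency-count re-implementation: one pass builds a counter of the
--     # nonzero values (and a zero tally z); each "pass" is then a dict pop
--     # instead of a rescan of the list.  Returns A's exact value but, unlike
--     # A, does not mutate L (the equivalence claimed is about the return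
--     # value only).
--     cnt = {}
--     z = 0
--     for v in L:
--         if v == 0:
--             z += 1
--         else:
--             cnt[v] = cnt.get(v, 0) + 1
--     total = 0
--     while True:
--         if x == 0:
--             c = z
--         else:
--             c = cnt.pop(x, 0)
--             z += c
--         if c == 0:
--             return total
--         total += c
--         x = c
-- ===== Notes on version B (the rewrite author's own statement) =====
-- stated objective: alternative
-- what changed: A rescans and rewrites the whole list on every recursive pass; B builds a frequency dict of the nonzero values (plus a zero tally) once and then resolves each pass with a single dict pop, iterating on the counts instead of the list.
import Mathlib
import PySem

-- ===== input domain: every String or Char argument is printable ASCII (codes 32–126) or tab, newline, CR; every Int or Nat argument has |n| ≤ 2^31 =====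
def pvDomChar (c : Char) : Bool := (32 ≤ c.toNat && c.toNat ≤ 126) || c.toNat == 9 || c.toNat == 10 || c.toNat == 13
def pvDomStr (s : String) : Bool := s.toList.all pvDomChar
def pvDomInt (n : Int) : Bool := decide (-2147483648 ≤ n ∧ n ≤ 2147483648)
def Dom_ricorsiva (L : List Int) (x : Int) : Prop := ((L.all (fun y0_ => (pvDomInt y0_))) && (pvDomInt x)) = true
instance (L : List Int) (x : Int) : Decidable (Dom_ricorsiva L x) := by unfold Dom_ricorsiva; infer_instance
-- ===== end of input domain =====

-- B replaces A's rescan-the-list-per-pass recursion with a frequency dict built once,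
-- each pass becoming a single dict lookup; A mutates L in place (zeroing matched
-- elements), B does not — the equivalence proved is about the return value only.

-- ===== PORT A =====
-- one pass of A's for-loop: zero every element equal to x, count the matches
def passA (x : Int) : List Int → List Int × Int
  | [] => ([], 0)
  | v :: t =>
    let p := passA x t
    if v = x then (0 :: p.1, p.2 + 1) else (v :: p.1, p.2)

theorem passA_fst (x : Int) (L : List Int) :
    (passA x L).1 = L.map (fun v => if v = x then 0 else v) := by
  induction L with
  | nil => rfl
  | cons v t ih => simp only [passA, List.map]; split <;> simp [ih]

theorem passA_snd (x : Int) (L : List Int) :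
    (passA x L).2 = (L.count x : Int) := by
  induction L with
  | nil => rfl
  | cons v t ih =>
    simp only [passA]
    by_cases h : v = x
    · simp [h, ih]
    · simp [h, ih]

theorem passA_fst_zero (L : List Int) : (passA 0 L).1 = L := by
  rw [passA_fst]
  conv_rhs => rw [← List.map_id L]
  exact List.map_congr_left (fun v _ => by split <;> simp_all)

theorem countP_passA_add (x : Int) (L : List Int) (hx : x ≠ 0) :
    ((passA x L).1.countP (fun v => decide (v ≠ 0))) + L.count x
      = L.countP (fun v => decide (v ≠ 0)) := by
  rw [passA_fst]
  induction L with
  | nil => rfl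
  | cons a t ih =>
    rw [List.map_cons, List.countP_cons, List.countP_cons, List.count_cons, ← ih]
    by_cases h : a = x
    · simp [h, hx]
      omega
    · simp [h, Ne.symm h]
      split_ifs <;> omega

def ricorsiva (L : List Int) (x : Int) : Int :=
  if (passA x L).2 = 0 then 0
  else (passA x L).2 + ricorsiva (passA x L).1 (passA x L).2
termination_by 2 * L.countP (fun v => decide (v ≠ 0)) + (if x = 0 then 1 else 0)
decreasing_by
  rename_i hne
  have hsnd := passA_snd x L
  have hcnt : L.count x ≠ 0 := by
    intro h0; exact hne (by rw [hsnd, h0]; rfl)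
  have hc1 : 1 ≤ L.count x := Nat.one_le_iff_ne_zero.mpr hcnt
  have hite : (if (passA x L).2 = 0 then (1:ℕ) else 0) = 0 := if_neg hne
  by_cases hx : x = 0
  · subst hx
    rw [passA_fst_zero, hite, if_pos rfl]
    omega
  · have hadd := countP_passA_add x L hx
    rw [hite]
    omega

-- ===== PORT B =====
-- build once: counter of the nonzero values of L, tally z of its zeros
def buildB (L : List Int) : PySem.Dict Int Int × Int :=
  L.foldl
    (fun s v =>
      if v = 0 then (s.1, s.2 + 1)
      else (s.1.insert v (s.1.getD v 0 + 1), s.2))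
    (PySem.Dict.empty, 0)

theorem erase_items_length_lt (d : PySem.Dict Int Int) (x : Int)
    (h : d.getD x 0 ≠ 0) : (d.erase x).items.length < d.items.length := by
  simp only [PySem.Dict.erase]
  apply List.length_filter_lt_length_iff_exists.mpr
  simp only [PySem.Dict.getD, PySem.Dict.get?] at h
  cases hf : List.find? (fun p => p.1 == x) d.items with
  | none => rw [hf] at h; simp at h
  | some p =>
    exact ⟨p, List.mem_of_find?_eq_some hf, by
      have := List.find?_some hf; simp_all⟩

-- the while-True loop of B: c is the current pass's count, looked up in the dict
def loopB (cnt : PySem.Dict Int Int) (z x total : Int) : Int :=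
  if x = 0 then
    if z = 0 then total else loopB cnt z z (total + z)
  else
    if cnt.getD x 0 = 0 then total
    else loopB (cnt.erase x) (z + cnt.getD x 0) (cnt.getD x 0) (total + cnt.getD x 0)
termination_by 2 * cnt.items.length + (if x = 0 then 1 else 0)
decreasing_by
  · rename_i hx hz; simp [hx, if_neg hz]
  · rename_i hx hc
    have := erase_items_length_lt cnt x hc
    have hite : (if cnt.getD x 0 = 0 then (1:ℕ) else 0) ≤ 1 := by split <;> omega
    omega

def ricorsiva_alt (L : List Int) (x : Int) : Int :=
  let b := buildB L
  loopB b.1 b.2 x 0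

-- ===== PRECONDITION & SPEC =====
def Spec_ricorsiva (L : List Int) (x : Int) (out : Int) : Prop := out = ricorsiva_alt L x
instance (L : List Int) (x : Int) (out : Int) : Decidable (Spec_ricorsiva L x out) := by unfold Spec_ricorsiva; infer_instance

-- ===== CLAIM (what is proved, stated in full; the proofs are below) =====
def Claim_equal_ricorsiva : Prop := ∀ (L : List Int) (x : Int), Dom_ricorsiva L x → Spec_ricorsiva L x (ricorsiva L x)

-- ===== LEMMAS AND PROOFS =====

-- the invariant tying B's state (cnt, z) to A's current list L
def RicInv (cnt : PySem.Dict Int Int) (z : Int) (L : List Int) : Prop :=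
  (∀ k : Int, k ≠ 0 → cnt.getD k 0 = (L.count k : Int)) ∧ z = (L.count 0 : Int)

theorem getD_erase_self (d : PySem.Dict Int Int) (x : Int) :
    (d.erase x).getD x 0 = 0 := by
  simp only [PySem.Dict.erase, PySem.Dict.getD, PySem.Dict.get?]
  rw [List.find?_eq_none.mpr]
  · rfl
  · intro p hp
    have := List.of_mem_filter hp
    simp_all

theorem find?_filter_key (x k : Int) (h : k ≠ x) (t : List (Int × Int)) :
    List.find? (fun p => p.1 == k) (t.filter (fun p => !(p.1 == x)))
      = List.find? (fun p => p.1 == k) t := by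
  induction t with
  | nil => rfl
  | cons p t ih =>
    by_cases hk : p.1 = k
    · simp [List.filter_cons, List.find?_cons, hk, h]
    · by_cases hp : p.1 = x <;>
        simp_all [List.filter_cons, List.find?_cons, hk, hp]

theorem getD_erase_of_ne (d : PySem.Dict Int Int) (x k : Int) (h : k ≠ x) :
    (d.erase x).getD k 0 = d.getD k 0 := by
  simp only [PySem.Dict.erase, PySem.Dict.getD, PySem.Dict.get?]
  rw [find?_filter_key x k h]

theorem buildB_inv (L : List Int) : RicInv (buildB L).1 (buildB L).2 L := by
  suffices h : ∀ (l : List Int) (d : PySem.Dict Int Int) (z : Int),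
      (∀ k : Int, k ≠ 0 →
        (l.foldl (fun s v =>
          if v = 0 then (s.1, s.2 + 1)
          else (s.1.insert v (s.1.getD v 0 + 1), s.2)) (d, z)).1.getD k 0
          = d.getD k 0 + (l.count k : Int)) ∧
      (l.foldl (fun s v =>
          if v = 0 then (s.1, s.2 + 1)
          else (s.1.insert v (s.1.getD v 0 + 1), s.2)) (d, z)).2
          = z + (l.count 0 : Int) by
    obtain ⟨h1, h2⟩ := h L PySem.Dict.empty 0
    unfold RicInv
    constructor
    · intro k hk
      have := h1 k hk
      simpa [buildB, PySem.Dict.getD_empty] using this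
    · simpa [buildB] using h2
  intro l
  induction l with
  | nil => intro d z; simp
  | cons v t ih =>
    intro d z
    by_cases hv : v = 0
    · subst hv
      obtain ⟨ih1, ih2⟩ := ih d (z + 1)
      refine ⟨?_, ?_⟩
      · intro k hk
        rw [List.foldl_cons, if_pos rfl]
        rw [ih1 k hk, List.count_cons]
        simp [Ne.symm hk]
      · rw [List.foldl_cons, if_pos rfl, ih2]
        have hcc : (0 :: t).count 0 = t.count 0 + 1 := by simp [List.count_cons]
        rw [hcc]
        push_cast
        ring
    · obtain ⟨ih1, ih2⟩ := ih (d.insert v (d.getD v 0 + 1)) z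
      refine ⟨?_, ?_⟩
      · intro k hk
        rw [List.foldl_cons, if_neg hv]
        rw [ih1 k hk, PySem.Dict.getD_insert, List.count_cons]
        by_cases hkv : k = v
        · subst hkv
          simp
          push_cast
          ring
        · simp [hkv, Ne.symm hkv]
      · rw [List.foldl_cons, if_neg hv, ih2, List.count_cons]
        simp [hv]

theorem count_map_zero_ne (x k : Int) (hkx : k ≠ x) (hk0 : k ≠ 0) (L : List Int) :
    (L.map (fun v => if v = x then 0 else v)).count k = L.count k := by
  induction L with
  | nil => rfl
  | cons a t ih =>
    by_cases h : a = x
    · simp [h, List.count_cons, ih, hk0, hkx, Ne.symm hk0, Ne.symm hkx]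
    · simp [h, List.count_cons, ih]

theorem count_map_zero_self (x : Int) (hx : x ≠ 0) (L : List Int) :
    (L.map (fun v => if v = x then 0 else v)).count x = 0 := by
  induction L with
  | nil => rfl
  | cons a t ih =>
    by_cases h : a = x
    · simp [h, List.count_cons, ih, hx, Ne.symm hx]
    · simp [h, List.count_cons, ih, Ne.symm h]

theorem count_map_zero_zero (x : Int) (hx : x ≠ 0) (L : List Int) :
    (L.map (fun v => if v = x then 0 else v)).count 0 = L.count 0 + L.count x := by
  induction L with
  | nil => rfl
  | cons a t ih =>
    by_cases h : a = x
    · simp [h, List.count_cons, ih, hx, Ne.symm hx]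
      omega
    · by_cases h0 : a = 0 <;>
        simp [h, h0, List.count_cons, ih, Ne.symm h, Ne.symm hx] <;> omega

theorem inv_step (cnt : PySem.Dict Int Int) (z : Int) (L : List Int) (x : Int)
    (hx : x ≠ 0) (h : RicInv cnt z L) :
    RicInv (cnt.erase x) (z + cnt.getD x 0) (passA x L).1 := by
  unfold RicInv at h ⊢
  obtain ⟨h1, h2⟩ := h
  rw [passA_fst x L]
  constructor
  · intro k hk
    by_cases hkx : k = x
    · subst hkx
      rw [getD_erase_self, count_map_zero_self k hx L]
      simp
    · rw [getD_erase_of_ne cnt x k hkx, h1 k hk,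
        count_map_zero_ne x k hkx hk L]
  · rw [h1 x hx, h2, count_map_zero_zero x hx L]
    push_cast
    ring

theorem loopB_eq (L : List Int) (x : Int) :
    ∀ (cnt : PySem.Dict Int Int) (z total : Int), RicInv cnt z L →
      loopB cnt z x total = total + ricorsiva L x := by
  induction L, x using ricorsiva.induct with
  | case1 L x hp =>
    intro cnt z total h
    unfold RicInv at h
    obtain ⟨h1, h2⟩ := h
    have hcnt : (L.count x : Int) = 0 := by rw [← passA_snd, hp]
    rw [ricorsiva, if_pos hp]
    by_cases hx : x = 0
    · subst hx
      rw [loopB, if_pos rfl, if_pos (by rw [h2]; exact_mod_cast hcnt)]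
      ring
    · rw [loopB, if_neg hx, if_pos (by rw [h1 x hx]; exact hcnt)]
      ring
  | case2 L x hp ih =>
    intro cnt z total h
    unfold RicInv at h
    obtain ⟨h1, h2⟩ := h
    have hcnt : (passA x L).2 = (L.count x : Int) := passA_snd x L
    rw [ricorsiva, if_neg hp]
    by_cases hx : x = 0
    · subst hx
      have hz : z = (passA (0:Int) L).2 := by rw [hcnt, h2]
      have hz0 : z ≠ 0 := by rw [hz]; exact hp
      have hL : (passA (0:Int) L).1 = L := passA_fst_zero L
      have hInv : RicInv cnt z (passA (0:Int) L).1 := by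
        rw [hL]; exact ⟨h1, h2⟩
      rw [loopB, if_pos rfl, if_neg hz0]
      rw [hz] at hInv ⊢
      rw [ih cnt (passA (0:Int) L).2 (total + (passA (0:Int) L).2) hInv]
      ring
    · have hc : cnt.getD x 0 = (passA x L).2 := by rw [h1 x hx, hcnt]
      have hInv := inv_step cnt z L x hx ⟨h1, h2⟩
      rw [hc] at hInv
      rw [loopB, if_neg hx, if_neg (by rw [hc]; exact hp), hc]
      rw [ih (cnt.erase x) (z + (passA x L).2) (total + (passA x L).2) hInv]
      ring

theorem ricorsiva_spec' (L : List Int) (x : Int) : ricorsiva L x = ricorsiva_alt L x := by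
  have := loopB_eq L x (buildB L).1 (buildB L).2 0 (buildB_inv L)
  rw [ricorsiva_alt]
  omega

-- ===== VERDICT (by name: the statement is the Claim_ definition above) =====
theorem ricorsiva_spec : Claim_equal_ricorsiva := by
  intro L x _
  unfold Spec_ricorsiva
  exact ricorsiva_spec' L x
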